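-- pv_equiv track=rewrite | github.com/San-Panhavuth/NovelTTS | backend/tests/attribution_benchmark.py | _canonicalize_for_search
-- ===== SOURCE A (Python) =====
-- def _canonicalize_for_search(text: str) -> tuple[str, list[int]]:
--     canonical_chars: list[str] = []
--     index_map: list[int] = []
--     previous_space = False
--
--     for index, char in enumerate(text):
--         if char.isalnum():
--             canonical_chars.append(char.lower())
--             index_map.append(index)
--             previous_space = False
--             continue
--
--         if char.isspace():
--             if not previous_space:
--                 canonical_chars.append(" ")
--                 index_map.append(index)
--                 previous_space = True
--             continue
--
--     canonical = "".join(canonical_chars).strip()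
--     if not canonical:
--         return "", [0]
--     return canonical, index_map
-- ===== SOURCE B (Python) =====
-- def _canonicalize_for_search(text: str) -> tuple[str, list[int]]:
--     # Run-based rewrite: consume maximal alnum runs and non-alnum gaps,
--     # emitting a single space per gap at its first whitespace index.
--     chars: list[str] = []
--     index_map: list[int] = []
--     i = 0
--     n = len(text)
--     while i < n:
--         if text[i].isalnum():
--             j = i
--             while j < n and text[j].isalnum():
--                 chars.append(text[j].lower())
--                 index_map.append(j)
--                 j += 1
--             i = j
--         else:
--             j = i
--             ws = None
--             while j < n and not text[j].isalnum():
--                 if ws is None and text[j].isspace():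
--                     ws = j
--                 j += 1
--             if ws is not None:
--                 chars.append(" ")
--                 index_map.append(ws)
--             i = j
--     canonical = "".join(chars).strip()
--     if not canonical:
--         return "", [0]
--     return canonical, index_map
-- ===== Notes on version B (the rewrite author's own statement) =====
-- stated objective: alternative
-- what changed: Replaces A's single char-by-char loop with a previous_space flag by a run-based scan that consumes maximal alnum runs and non-alnum gaps, emitting one space per gap at its first whitespace index.
import Mathlib
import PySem

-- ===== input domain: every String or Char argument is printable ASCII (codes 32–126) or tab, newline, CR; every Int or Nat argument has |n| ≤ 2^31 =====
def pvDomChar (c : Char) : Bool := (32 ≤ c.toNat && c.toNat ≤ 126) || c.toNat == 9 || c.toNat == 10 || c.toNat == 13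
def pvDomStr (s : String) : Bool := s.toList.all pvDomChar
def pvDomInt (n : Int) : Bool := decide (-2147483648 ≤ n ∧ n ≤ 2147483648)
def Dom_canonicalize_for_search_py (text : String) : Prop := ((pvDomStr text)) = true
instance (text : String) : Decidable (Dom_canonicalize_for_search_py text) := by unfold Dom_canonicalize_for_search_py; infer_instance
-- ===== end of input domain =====

-- B replaces A's char-by-char loop with a `previous_space` flag by a run-based scan
-- (maximal alnum runs / non-alnum gaps, one space per gap at its first whitespace index);
-- objective: alternative decomposition, same cost.

-- ===== PORT A =====
-- A's for-loop over enumerate(text) with accumulators and the previous_space flag.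
def pvLoopA : List (Int × Char) → List Char → List Int → Bool → List Char × List Int
  | [], cs, im, _ => (cs, im)
  | (i, c) :: rest, cs, im, prev =>
    if PySem.Chars.isalnum c then
      pvLoopA rest (cs ++ [PySem.Chars.lowerChar c]) (im ++ [i]) false
    else if PySem.Chars.isspace c then
      if prev = false then pvLoopA rest (cs ++ [' ']) (im ++ [i]) true
      else pvLoopA rest cs im prev
    else pvLoopA rest cs im prev

def canonicalize_for_search_py (text : String) : String × List Int :=
  let p := pvLoopA (PySem.List.enumerate text.toList 0) [] [] false
  let canonical := PySem.Chars.strip p.1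
  if canonical = [] then ("", [0]) else (String.ofList canonical, p.2)

-- ===== PORT B =====
-- B's outer while loop: pvRunAl consumes a maximal alnum run, pvRunGap scans a
-- non-alnum gap tracking the first whitespace index (ws), emitting one space per gap.
mutual
def pvRunAl : List Char → Int → List Char × List Int
  | [], _ => ([], [])
  | c :: rest, i =>
    if PySem.Chars.isalnum c then
      let p := pvRunAl rest (i + 1)
      (PySem.Chars.lowerChar c :: p.1, i :: p.2)
    else
      pvRunGap rest (i + 1) (if PySem.Chars.isspace c then some i else none)

def pvRunGap : List Char → Int → Option Int → List Char × List Int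
  | [], _, ws =>
    match ws with
    | some w => ([' '], [w])
    | none => ([], [])
  | c :: rest, i, ws =>
    if PySem.Chars.isalnum c then
      let p := pvRunAl rest (i + 1)
      match ws with
      | some w => (' ' :: PySem.Chars.lowerChar c :: p.1, w :: i :: p.2)
      | none => (PySem.Chars.lowerChar c :: p.1, i :: p.2)
    else
      pvRunGap rest (i + 1)
        (match ws with
         | some w => some w
         | none => if PySem.Chars.isspace c then some i else none)
end

def canonicalize_for_search_py_alt (text : String) : String × List Int :=
  let p := pvRunAl text.toList 0
  let canonical := PySem.Chars.strip p.1
  if canonical = [] then ("", [0]) else (String.ofList canonical, p.2)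

-- ===== PRECONDITION & SPEC =====
def Spec_canonicalize_for_search_py (text : String) (out : String × List Int) : Prop := out = canonicalize_for_search_py_alt text
instance (text : String) (out : String × List Int) : Decidable (Spec_canonicalize_for_search_py text out) := by unfold Spec_canonicalize_for_search_py; infer_instance

-- ===== CLAIM (what is proved, stated in full; the proofs are below) =====
def Claim_equal_canonicalize_for_search_py : Prop := ∀ (text : String), Dom_canonicalize_for_search_py text → Spec_canonicalize_for_search_py text (canonicalize_for_search_py text)

-- ===== LEMMAS AND PROOFS =====

-- Accumulator-free reformulation of A's loop, used only by the proof.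
def pvPureA : List Char → Int → Bool → List Char × List Int
  | [], _, _ => ([], [])
  | c :: rest, i, prev =>
    if PySem.Chars.isalnum c then
      let p := pvPureA rest (i + 1) false
      (PySem.Chars.lowerChar c :: p.1, i :: p.2)
    else if PySem.Chars.isspace c then
      if prev = false then
        let p := pvPureA rest (i + 1) true
        (' ' :: p.1, i :: p.2)
      else pvPureA rest (i + 1) prev
    else pvPureA rest (i + 1) prev

theorem pvLoopA_eq_pure (l : List Char) : ∀ (i : Int) (cs : List Char) (im : List Int) (prev : Bool),
    pvLoopA (PySem.List.enumerate l i) cs im prev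
      = (cs ++ (pvPureA l i prev).1, im ++ (pvPureA l i prev).2) := by
  induction l with
  | nil => intro i cs im prev; simp [pvLoopA, pvPureA, PySem.List.enumerate_nil]
  | cons c rest ih =>
    intro i cs im prev
    simp only [PySem.List.enumerate_cons, pvLoopA, pvPureA]
    by_cases hal : PySem.Chars.isalnum c = true
    · simp [hal, ih]
    · by_cases hsp : PySem.Chars.isspace c = true
      · cases prev <;> simp [hal, hsp, ih]
      · simp [hal, hsp, ih]

theorem pvRun_eq_pure (l : List Char) :
    (∀ i : Int, pvRunAl l i = pvPureA l i false) ∧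
    (∀ i : Int, pvRunGap l i none = pvPureA l i false) ∧
    (∀ (i w : Int), pvRunGap l i (some w)
        = (' ' :: (pvPureA l i true).1, w :: (pvPureA l i true).2)) := by
  induction l with
  | nil => refine ⟨fun i => rfl, fun i => rfl, fun i w => rfl⟩
  | cons c rest ih =>
    obtain ⟨ih1, ih2, ih3⟩ := ih
    by_cases hal : PySem.Chars.isalnum c = true
    · refine ⟨fun i => ?_, fun i => ?_, fun i w => ?_⟩ <;>
        simp [pvRunAl, pvRunGap, pvPureA, hal, ih1]
    · by_cases hsp : PySem.Chars.isspace c = true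
      · refine ⟨fun i => ?_, fun i => ?_, fun i w => ?_⟩ <;>
          simp [pvRunAl, pvRunGap, pvPureA, hal, hsp, ih3]
      · refine ⟨fun i => ?_, fun i => ?_, fun i w => ?_⟩ <;>
          simp [pvRunAl, pvRunGap, pvPureA, hal, hsp, ih2, ih3]

-- ===== VERDICT (by name: the statement is the Claim_ definition above) =====
theorem canonicalize_for_search_py_spec : Claim_equal_canonicalize_for_search_py := by
  intro text _
  unfold Spec_canonicalize_for_search_py canonicalize_for_search_py canonicalize_for_search_py_alt
  rw [pvLoopA_eq_pure, (pvRun_eq_pure text.toList).1]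
  simp
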